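-- pv_equiv track=rewrite | github.com/John3210of/AnyPrac | 9rogramers/high_kit/stack_queue.py | solution
-- ===== SOURCE A (Python) =====
-- from collections import deque
-- import math
-- from collections import deque
-- from collections import deque
--
-- def solution(progresses, speeds):
--     answer = []
--     days = deque()
--     # 각 기능이 배포되기까지 걸리는 일수 계산하여 days 큐에 저장
--     # 첫 번째 기능부터 순서대로 확인하며 배포 처리
--     # 기능들 중 배포 가능한 것 확인
--     for i in range(len(progresses)):
--         remain = math.ceil((100 - progresses[i]) / speeds[i])
--         days.append(remain)
--     while days:
--         count = 1
--         first = days.popleft()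
--         while days and days[0] <= first:
--             days.popleft()
--             count += 1
--         answer.append(count)
--
--     return answer
-- ===== SOURCE B (Python) =====
-- def solution(progresses, speeds):
--     # integer ceiling division instead of float math.ceil
--     days = [-((p - 100) // s) for p, s in zip(progresses, speeds)]
--     answer = []
--     if not days:
--         return answer
--     deadline = days[0]
--     count = 1
--     for d in days[1:]:
--         if d <= deadline:
--             count += 1
--         else:
--             answer.append(count)
--             deadline = d
--             count = 1
--     answer.append(count)
--     return answer
-- ===== Notes on version B (the rewrite author's own statement) =====
-- stated objective: simpler
-- what changed: Replaces the deque with nested popleft while-loops and float math.ceil by pure integer ceiling division over zip plus one flat scan that threads (deadline, count) through a single branch, appending a group count whenever a later deadline exceeds the current leader.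
import Mathlib
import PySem

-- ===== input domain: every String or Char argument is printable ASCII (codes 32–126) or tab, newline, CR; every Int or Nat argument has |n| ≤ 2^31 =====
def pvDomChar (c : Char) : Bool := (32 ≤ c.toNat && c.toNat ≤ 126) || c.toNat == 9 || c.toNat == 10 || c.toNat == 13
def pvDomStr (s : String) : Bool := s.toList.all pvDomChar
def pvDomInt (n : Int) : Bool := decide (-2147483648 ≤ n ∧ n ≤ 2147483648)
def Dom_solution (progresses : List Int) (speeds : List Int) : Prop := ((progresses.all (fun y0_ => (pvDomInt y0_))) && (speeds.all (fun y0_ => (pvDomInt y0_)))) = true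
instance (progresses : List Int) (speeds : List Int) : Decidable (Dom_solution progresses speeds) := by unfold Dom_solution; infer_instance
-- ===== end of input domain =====

-- B replaces the deque drain (nested popleft while-loops) and float math.ceil by integer
-- ceiling division plus ONE flat scan threading a (deadline, count) accumulator. Same O(n).

-- ===== PORT A =====
-- math.ceil((100-p)/s) ported as exact integer ceiling -((-(100-p)) // s); on Dom (|ints| ≤ 2^31)
-- the float division is exactly rounded and its ceil equals the exact rational ceil.
def solutionDays (progresses : List Int) (speeds : List Int) : List Int :=
  (PySem.List.pyRange 0 progresses.length 1).foldl (fun days i =>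
    let p := (PySem.List.pyGet? progresses i).getD 0   -- in range by construction
    let s := (PySem.List.pyGet? speeds i).getD 0       -- Pre_ guarantees in range and ≠ 0
    days ++ [-(PySem.Int.floordiv (-(100 - p)) s)]) []

-- inner `while days and days[0] <= first`: returns (number popped, remaining deque)
def solutionPop (first : Int) : List Int → Int × List Int
  | [] => (0, [])
  | d :: rest =>
    if d ≤ first then
      let (c, r) := solutionPop first rest
      (c + 1, r)
    else (0, d :: rest)

theorem solutionPop_len (first : Int) (l : List Int) : (solutionPop first l).2.length ≤ l.length := by
  induction l with
  | nil => simp [solutionPop]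
  | cons d rest ih =>
    simp only [solutionPop]
    split
    · simpa using ih.trans (Nat.le_succ _)
    · simp

-- outer `while days:` loop
def solutionLoop : List Int → List Int
  | [] => []
  | first :: rest =>
    let pr := solutionPop first rest
    (1 + pr.1) :: solutionLoop pr.2
termination_by l => l.length
decreasing_by
  simpa using Nat.lt_succ_of_le (solutionPop_len first rest)

def solution (progresses : List Int) (speeds : List Int) : List Int :=
  solutionLoop (solutionDays progresses speeds)

-- ===== PORT B =====
-- days via zip + integer ceiling division
def solutionAltDays (progresses : List Int) (speeds : List Int) : List Int :=
  (progresses.zip speeds).map (fun ps => -(PySem.Int.floordiv (ps.1 - 100) ps.2))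

-- single flat scan with (deadline, count) accumulator; emits `count` on each new leader,
-- and the final count at the end
def solutionAltScan (deadline count : Int) : List Int → List Int
  | [] => [count]
  | d :: rest =>
    if d ≤ deadline then solutionAltScan deadline (count + 1) rest
    else count :: solutionAltScan d 1 rest

def solution_alt (progresses : List Int) (speeds : List Int) : List Int :=
  match solutionAltDays progresses speeds with
  | [] => []
  | d0 :: rest => solutionAltScan d0 1 rest

-- ===== PRECONDITION & SPEC =====
-- Pre_ excludes exactly the inputs where A raises: IndexError when progresses is longer than
-- speeds, ZeroDivisionError when a used speed is 0. A returns normally everywhere else.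
def Pre_solution (progresses : List Int) (speeds : List Int) : Prop :=
  progresses.length ≤ speeds.length ∧ ∀ x ∈ speeds.take progresses.length, x ≠ 0
instance (progresses : List Int) (speeds : List Int) : Decidable (Pre_solution progresses speeds) := by unfold Pre_solution; infer_instance

def pvWitness_solution : List Int × List Int := ([93, 30, 55], [1, 30, 5])

def Spec_solution (progresses : List Int) (speeds : List Int) (out : List Int) : Prop := out = solution_alt progresses speeds
instance (progresses : List Int) (speeds : List Int) (out : List Int) : Decidable (Spec_solution progresses speeds out) := by unfold Spec_solution; infer_instance

-- ===== CLAIM (what is proved, stated in full; the proofs are below) =====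
def Claim_equal_solution : Prop := ∀ (progresses : List Int) (speeds : List Int), Dom_solution progresses speeds → Pre_solution progresses speeds → Spec_solution progresses speeds (solution progresses speeds)

-- ===== LEMMAS AND PROOFS =====

-- B's scan is A's drain, one group at a time.
theorem scan_eq_loop (deadline count : Int) (l : List Int) :
    solutionAltScan deadline count l =
      (count + (solutionPop deadline l).1) :: solutionLoop (solutionPop deadline l).2 := by
  induction l generalizing deadline count with
  | nil => simp [solutionAltScan, solutionPop, solutionLoop]
  | cons d rest ih =>
    simp only [solutionAltScan, solutionPop]
    split
    · rw [ih]
      ring_nf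
    · rw [ih]
      simp [solutionLoop]

theorem loop_eq_alt (l : List Int) :
    solutionLoop l = (match l with | [] => [] | d0 :: rest => solutionAltScan d0 1 rest) := by
  cases l with
  | nil => simp [solutionLoop]
  | cons d0 rest =>
    show solutionLoop (d0 :: rest) = solutionAltScan d0 1 rest
    rw [scan_eq_loop]
    simp only [solutionLoop]

-- a foldl that only appends one element per step builds acc ++ map
theorem foldl_append_map (f : Int → Int) (l acc : List Int) :
    l.foldl (fun days i => days ++ [f i]) acc = acc ++ l.map f := by
  induction l generalizing acc with
  | nil => simp
  | cons x xs ih => simp [ih]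

-- Under Pre_, A's indexed day list equals B's zipped day list.
theorem days_eq (progresses speeds : List Int)
    (hlen : progresses.length ≤ speeds.length) :
    solutionDays progresses speeds = solutionAltDays progresses speeds := by
  unfold solutionDays solutionAltDays
  rw [foldl_append_map, List.nil_append, PySem.List.pyRange_one]
  simp only [List.map_map]
  apply List.ext_getElem
  · simp [List.length_zip]; omega
  · intro i h1 h2
    have hi : i < progresses.length := by simpa using h1
    simp only [List.getElem_map, List.getElem_range, List.getElem_zip, Function.comp]
    have hi2 : i < speeds.length := by omega
    simp [List.getElem?_eq_getElem hi, List.getElem?_eq_getElem hi2]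

-- ===== VERDICT (by name: the statement is the Claim_ definition above) =====
theorem solution_spec : Claim_equal_solution := by
  intro progresses speeds _ hpre
  unfold Spec_solution solution solution_alt
  rw [days_eq progresses speeds hpre.1, loop_eq_alt]
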